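-- pv_equiv track=rewrite | github.com/scrossle-teck/nasuni-analytics | scripts/find_shares_missing_admin_full.py | is_admin_name
-- ===== SOURCE A (Python) =====
-- ADMIN_PATTERNS = ['admin', 'g-f-all-full-control', 's-1-22-1-0', 'system', 's-1-5-18', 'nt authority\\system']
--
-- def is_admin_name(name: str) -> bool:
--     if not name:
--         return False
--     nl = name.lower()
--     for p in ADMIN_PATTERNS:
--         if p in nl:
--             return True
--     return False
-- ===== SOURCE B (Python) =====
-- ADMIN_PATTERNS = ['admin', 'g-f-all-full-control', 's-1-22-1-0', 'system', 's-1-5-18', 'nt authority\\system']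
--
-- def is_admin_name(name: str) -> bool:
--     nl = name.lower()
--     return any(
--         any(nl.startswith(p, i) for p in ADMIN_PATTERNS)
--         for i in range(len(nl))
--     )
-- ===== Notes on version B (the rewrite author's own statement) =====
-- stated objective: alternative
-- what changed: B scans the lowercased name position by position, asking at each index whether any admin pattern starts there (the automaton-style single left-to-right sweep), instead of A's pattern-by-pattern loop of independent substring searches; the empty-name guard disappears because the position scan is vacuous on an empty string.
import Mathlib
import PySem

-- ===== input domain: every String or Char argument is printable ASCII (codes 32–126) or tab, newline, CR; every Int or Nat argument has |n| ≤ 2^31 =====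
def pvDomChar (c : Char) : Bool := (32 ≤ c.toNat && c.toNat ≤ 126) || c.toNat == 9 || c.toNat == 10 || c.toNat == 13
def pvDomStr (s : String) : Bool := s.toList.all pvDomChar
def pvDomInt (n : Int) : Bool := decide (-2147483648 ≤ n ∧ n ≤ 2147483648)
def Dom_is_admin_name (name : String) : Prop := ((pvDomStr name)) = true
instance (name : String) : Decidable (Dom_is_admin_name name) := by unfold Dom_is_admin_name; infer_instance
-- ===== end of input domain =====

-- B replaces A's pattern-by-pattern substring searches with a single position-by-position
-- scan of the lowercased name, testing at each index whether any admin pattern starts there.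


-- ===== PORT A =====
def ADMIN_PATTERNS : List (List Char) :=
  ["admin".toList, "g-f-all-full-control".toList, "s-1-22-1-0".toList,
   "system".toList, "s-1-5-18".toList, "nt authority\\system".toList]

-- A's 'for p in ADMIN_PATTERNS: if p in nl: return True' loop
def aLoop (nl : List Char) : List (List Char) → Bool
  | [] => false
  | p :: ps => if PySem.Chars.isIn p nl then true else aLoop nl ps

def is_admin_name (name : String) : Bool :=
  if name.toList = [] then false          -- 'if not name: return False'
  else aLoop (PySem.Chars.lower name.toList) ADMIN_PATTERNS

-- ===== PORT B =====
-- B's 'any(any(nl.startswith(p, i) for p in ADMIN_PATTERNS) for i in range(len(nl)))'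
def is_admin_name_alt (name : String) : Bool :=
  let nl := PySem.Chars.lower name.toList
  (List.range nl.length).any (fun i =>
    ADMIN_PATTERNS.any (fun p => PySem.Chars.startswith (nl.drop i) p))

-- ===== PRECONDITION & SPEC =====
def Spec_is_admin_name (name : String) (out : Bool) : Prop := out = is_admin_name_alt name
instance (name : String) (out : Bool) : Decidable (Spec_is_admin_name name out) := by unfold Spec_is_admin_name; infer_instance

-- ===== CLAIM (what is proved, stated in full; the proofs are below) =====
def Claim_equal_is_admin_name : Prop := ∀ (name : String), Dom_is_admin_name name → Spec_is_admin_name name (is_admin_name name)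

-- ===== LEMMAS AND PROOFS =====

-- A's early-return loop is an 'any' over the pattern list
lemma aLoop_eq_any (nl : List Char) (ps : List (List Char)) :
    aLoop nl ps = ps.any (fun p => PySem.Chars.isIn p nl) := by
  induction ps with
  | nil => rfl
  | cons p ps ih => cases h : PySem.Chars.isIn p nl <;> simp [aLoop, h, ih]

-- a nonempty pattern occurs in s iff it starts at some position strictly inside s
lemma isIn_iff_exists_lt (sub s : List Char) (hne : sub ≠ []) :
    PySem.Chars.isIn sub s = true ↔ ∃ j < s.length, sub <+: s.drop j := by
  rw [← PySem.Chars.exists_prefix_drop_iff_isIn]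
  constructor
  · rintro ⟨j, hj⟩
    refine ⟨j, ?_, hj⟩
    by_contra h
    rw [List.drop_eq_nil_of_le (by omega)] at hj
    exact hne (List.prefix_nil.mp hj)
  · rintro ⟨j, _, hj⟩; exact ⟨j, hj⟩

lemma admin_patterns_ne_nil : ∀ p ∈ ADMIN_PATTERNS, p ≠ [] := by decide

-- ===== VERDICT (by name: the statement is the Claim_ definition above) =====
theorem is_admin_name_spec : Claim_equal_is_admin_name := by
  intro name _
  unfold Spec_is_admin_name is_admin_name is_admin_name_alt
  split_ifs with h
  · simp [h, PySem.Chars.lower]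
  · rw [Bool.eq_iff_iff, aLoop_eq_any]
    simp only [List.any_eq_true, List.mem_range]
    constructor
    · rintro ⟨p, hp, hin⟩
      obtain ⟨j, hjlt, hjp⟩ := (isIn_iff_exists_lt p _ (admin_patterns_ne_nil p hp)).mp hin
      exact ⟨j, hjlt, p, hp, (PySem.Chars.startswith_iff _ _).mpr hjp⟩
    · rintro ⟨j, hjlt, p, hp, hsw⟩
      exact ⟨p, hp, (isIn_iff_exists_lt p _ (admin_patterns_ne_nil p hp)).mpr
        ⟨j, hjlt, (PySem.Chars.startswith_iff _ _).mp hsw⟩⟩
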